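-- pv_equiv track=rewrite | github.com/drewrichardson/advent | day_2/p2/main.py | sum_invalid_for_fixed_length
-- ===== SOURCE A (Python) =====
-- def sum_invalid_for_fixed_length(L):
--     divisors = [d for d in range(1, L) if L % d == 0]
--
--     sum_roots_by_period = {}
--     current_length_total_id_sum = 0
--
--     for d in sorted(divisors):
--         min_root = 10**(d-1)
--         max_root = (10**d) - 1
--         raw_sum = sum_arithmetic(min_root, max_root)
--
--         primitive_root_sum = raw_sum
--         for smaller_d in sum_roots_by_period:
--             if d % smaller_d == 0:
--                 scale_mult = get_repetition_multiplier(smaller_d, d)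
--                 overlap_sum = sum_roots_by_period[smaller_d] * scale_mult
--                 primitive_root_sum -= overlap_sum
--
--         sum_roots_by_period[d] = primitive_root_sum
--
--         final_mult = get_repetition_multiplier(d, L)
--         current_length_total_id_sum += primitive_root_sum * final_mult
--
--     return current_length_total_id_sum
--
-- def sum_arithmetic(start, end):
--     if start > end: return 0
--     count = end - start + 1
--     return (count * (start + end)) // 2
--
-- def get_repetition_multiplier(chunk_len, total_len):
--     return (10**total_len - 1) // (10**chunk_len - 1)
-- ===== SOURCE B (Python) =====
-- def sum_invalid_for_fixed_length(L):
--     # Inclusion-exclusion over the distinct prime factors of L: an invalid ID of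
--     # length L is one whose period divides L // p for some prime p | L.
--     if L < 2:
--         return 0
--     primes = [p for p in range(2, L + 1)
--               if L % p == 0 and all(p % q != 0 for q in range(2, p))]
--     subsets = [(1, 1)]
--     for p in primes:
--         subsets = subsets + [(m * p, -s) for (m, s) in subsets]
--     total = 0
--     for (m, s) in subsets[1:]:
--         d = L // m
--         lo = 10 ** (d - 1)
--         hi = 10 ** d - 1
--         block = (hi - lo + 1) * (lo + hi) // 2
--         total += (-s) * block * ((10 ** L - 1) // (10 ** d - 1))
--     return total
-- ===== Notes on version B (the rewrite author's own statement) =====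
-- stated objective: alternative
-- what changed: A builds primitive-period root sums divisor by divisor, subtracting overlaps from earlier periods kept in a dict; B instead applies inclusion-exclusion over the distinct prime factors of L, summing signed repeated-block sums for each nonempty subset of primes.
import Mathlib
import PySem

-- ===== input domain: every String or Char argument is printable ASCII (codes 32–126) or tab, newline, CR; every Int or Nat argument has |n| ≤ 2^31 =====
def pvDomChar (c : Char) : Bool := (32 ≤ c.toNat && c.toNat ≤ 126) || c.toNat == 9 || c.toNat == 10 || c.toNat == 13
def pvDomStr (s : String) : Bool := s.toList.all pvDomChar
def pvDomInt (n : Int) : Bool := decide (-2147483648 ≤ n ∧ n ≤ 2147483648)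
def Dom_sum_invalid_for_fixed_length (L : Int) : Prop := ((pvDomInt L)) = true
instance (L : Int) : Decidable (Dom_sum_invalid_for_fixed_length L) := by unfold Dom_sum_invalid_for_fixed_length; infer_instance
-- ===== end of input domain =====

-- B replaces A's divisor-by-divisor subtraction of repeated-root sums by
-- inclusion-exclusion over the distinct prime factors of L (alternative
-- decomposition, similar cost).

-- ===== PORT A =====
def sumArith (start end_ : Int) : Int :=
  if start > end_ then 0 else PySem.Int.floordiv ((end_ - start + 1) * (start + end_)) 2

-- Python's 10**e; every reached call has e ≥ 0, where .toNat is exact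
def repMult (chunk total : Int) : Int :=
  PySem.Int.floordiv (10 ^ total.toNat - 1) (10 ^ chunk.toNat - 1)

def stepA (L : Int) (st : PySem.Dict Int Int × Int) (d : Int) : PySem.Dict Int Int × Int :=
  let minRoot : Int := 10 ^ (d - 1).toNat
  let maxRoot : Int := 10 ^ d.toNat - 1
  let rawSum := sumArith minRoot maxRoot
  let prs := st.1.items.foldl (fun acc kv =>
      if PySem.Int.mod d kv.1 == 0 then acc - kv.2 * repMult kv.1 d else acc) rawSum
  (st.1.insert d prs, st.2 + prs * repMult d L)

def sum_invalid_for_fixed_length (L : Int) : Int :=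
  let divisors := (PySem.List.pyRange 1 L 1).filter (fun d => PySem.Int.mod L d == 0)
  ((PySem.List.sorted divisors (fun x => x) false).foldl (stepA L) (PySem.Dict.empty, 0)).2

-- ===== PORT B =====
def sum_invalid_for_fixed_length_alt (L : Int) : Int :=
  if L < 2 then 0
  else
    let primes := (PySem.List.pyRange 2 (L + 1) 1).filter (fun p =>
        PySem.Int.mod L p == 0 &&
          (PySem.List.pyRange 2 p 1).all (fun q => PySem.Int.mod p q != 0))
    let subsets := primes.foldl
        (fun acc p => acc ++ acc.map (fun ms => (ms.1 * p, -ms.2)))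
        ([((1 : Int), (1 : Int))])
    (subsets.drop 1).foldl (fun t ms =>
        let d := PySem.Int.floordiv L ms.1
        let lo : Int := 10 ^ (d - 1).toNat
        let hi : Int := 10 ^ d.toNat - 1
        let block := PySem.Int.floordiv ((hi - lo + 1) * (lo + hi)) 2
        t + (-ms.2) * block * PySem.Int.floordiv (10 ^ L.toNat - 1) (10 ^ d.toNat - 1)) 0

-- ===== PRECONDITION & SPEC =====
def Spec_sum_invalid_for_fixed_length (L : Int) (out : Int) : Prop := out = sum_invalid_for_fixed_length_alt L
instance (L : Int) (out : Int) : Decidable (Spec_sum_invalid_for_fixed_length L out) := by unfold Spec_sum_invalid_for_fixed_length; infer_instance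

-- ===== CLAIM (what is proved, stated in full; the proofs are below) =====
def Claim_equal_sum_invalid_for_fixed_length : Prop := ∀ (L : Int), Dom_sum_invalid_for_fixed_length L → Spec_sum_invalid_for_fixed_length L (sum_invalid_for_fixed_length L)

-- ===== LEMMAS AND PROOFS =====

-- (10^d - 1) / (10^e - 1) for e ∣ d, as an exact geometric sum
def M (e d : ℕ) : ℤ := ∑ i ∈ Finset.range (d / e), (10:ℤ) ^ (e * i)

-- sum of all d-digit roots (A's raw_sum for block length d)
def rawZ (k : ℕ) : ℤ := sumArith ((10:ℤ) ^ (k - 1)) ((10:ℤ) ^ k - 1)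

-- sum of the d-digit PRIMITIVE roots: A's recurrence, as a well-founded recursion
def prim (d : ℕ) : ℤ :=
  rawZ d - ∑ e ∈ d.properDivisors.attach, prim e.1 * M e.1 d
termination_by d
decreasing_by exact (Nat.mem_properDivisors.mp e.2).2

lemma prim_def (d : ℕ) : prim d = rawZ d - ∑ e ∈ d.properDivisors, prim e * M e d := by
  rw [prim, ← Finset.sum_attach d.properDivisors (fun e => prim e * M e d)]

lemma geomM {e d : ℕ} (h : e ∣ d) : ((10:ℤ) ^ e - 1) * M e d = (10:ℤ) ^ d - 1 := by
  obtain ⟨k, rfl⟩ := h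
  by_cases he : e = 0
  · subst he; simp [M]
  · have hk : e * k / e = k := Nat.mul_div_cancel_left k (Nat.pos_of_ne_zero he)
    rw [M, hk]
    have hpw : ∀ i, (10:ℤ) ^ (e * i) = ((10:ℤ) ^ e) ^ i := fun i => by rw [← pow_mul]
    simp only [hpw]
    rw [mul_comm, geom_sum_mul, ← pow_mul]

lemma pow10_sub_one_pos {e : ℕ} (he : 1 ≤ e) : (0:ℤ) < (10:ℤ) ^ e - 1 := by
  have : (10:ℤ) ^ 1 ≤ (10:ℤ) ^ e := pow_le_pow_right₀ (by norm_num) he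
  simpa using lt_of_lt_of_le (by norm_num) this

lemma M_self {e : ℕ} (he : 1 ≤ e) : M e e = 1 := by
  simp [M, Nat.div_self he]

lemma M_mul {e c d : ℕ} (he : 1 ≤ e) (hec : e ∣ c) (hcd : c ∣ d) :
    M e c * M c d = M e d := by
  have h10 : ((10:ℤ) ^ e - 1) ≠ 0 := ne_of_gt (pow10_sub_one_pos he)
  apply mul_left_cancel₀ h10
  rw [← mul_assoc, geomM hec, geomM (hec.trans hcd), geomM hcd]

lemma floordiv_pow {e d : ℕ} (he : 1 ≤ e) (h : e ∣ d) :
    PySem.Int.floordiv ((10:ℤ) ^ d - 1) ((10:ℤ) ^ e - 1) = M e d := by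
  rw [PySem.Int.floordiv_eq_ediv_of_pos (pow10_sub_one_pos he)]
  exact Eq.symm (Int.eq_ediv_of_mul_eq_right (ne_of_gt (pow10_sub_one_pos he)) (geomM h))

lemma repMult_eq {e d : ℕ} (he : 1 ≤ e) (h : e ∣ d) :
    repMult (e:ℤ) (d:ℤ) = M e d := by
  simpa [repMult] using floordiv_pow he h

lemma raw_div_sum {c : ℕ} (hc : 1 ≤ c) :
    rawZ c = ∑ e ∈ c.divisors, prim e * M e c := by
  have hne : c ≠ 0 := by omega
  rw [← Nat.insert_self_properDivisors hne,
    Finset.sum_insert Nat.self_notMem_properDivisors, M_self hc, prim_def]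
  ring

def sumDiv (n : ℕ) : ℤ := ∑ d ∈ n.properDivisors, prim d * M d n

def IE (n : ℕ) : ℤ :=
  ∑ T ∈ n.primeFactors.powerset.erase ∅,
    (-1:ℤ) ^ (T.card + 1) * (rawZ (n / T.prod id) * M (n / T.prod id) n)

lemma signcount {n e : ℕ} (hn : 1 ≤ n) (he : e ∈ n.divisors) :
    (∑ T ∈ n.primeFactors.powerset.erase ∅,
      (if e ∣ n / T.prod id then (-1:ℤ) ^ (T.card + 1) else 0))
    = if e = n then 0 else 1 := by
  have hedvd : e ∣ n := (Nat.mem_divisors.mp he).1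
  have hn0 : n ≠ 0 := by omega
  have he0 : e ≠ 0 := by have := Nat.pos_of_mem_divisors he; omega
  have hprod : e * (n / e) = n := Nat.mul_div_cancel' hedvd
  have hne0 : n / e ≠ 0 := by intro h; rw [h, mul_zero] at hprod; omega
  have hdivdvd : n / e ∣ n := ⟨e, by rw [Nat.div_mul_cancel hedvd]⟩
  have hBsub : (n / e).primeFactors ⊆ n.primeFactors := Nat.primeFactors_mono hdivdvd hn0
  have hcond : ∀ T ∈ n.primeFactors.powerset.erase ∅,
      ((e ∣ n / T.prod id) ↔ T ⊆ (n / e).primeFactors) := by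
    intro T hT
    have hTsub : T ⊆ n.primeFactors := Finset.mem_powerset.mp (Finset.mem_of_mem_erase hT)
    have hTdvd : T.prod id ∣ n :=
      Finset.prod_primes_dvd n (fun p hp => (Nat.prime_of_mem_primeFactors (hTsub hp)).prime)
        (fun p hp => Nat.dvd_of_mem_primeFactors (hTsub hp))
    constructor
    · intro hdvd p hp
      refine Nat.mem_primeFactors.mpr ⟨Nat.prime_of_mem_primeFactors (hTsub hp), ?_, hne0⟩
      have h1 : T.prod id * e ∣ n := (Nat.dvd_div_iff_mul_dvd hTdvd).mp hdvd
      have h2 : T.prod id ∣ n / e := (Nat.dvd_div_iff_mul_dvd hedvd).mpr (by rwa [mul_comm] at h1)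
      exact dvd_trans (Finset.dvd_prod_of_mem id hp) h2
    · intro hTB
      have h2 : T.prod id ∣ n / e :=
        Finset.prod_primes_dvd (n / e) (fun p hp => (Nat.prime_of_mem_primeFactors (hTsub hp)).prime)
          (fun p hp => Nat.dvd_of_mem_primeFactors (hTB hp))
      have h1 : e * T.prod id ∣ n := (Nat.dvd_div_iff_mul_dvd hedvd).mp h2
      exact (Nat.dvd_div_iff_mul_dvd hTdvd).mpr (by rwa [mul_comm] at h1)
  rw [Finset.sum_congr rfl (fun T hT => if_congr (hcond T hT) rfl rfl)]
  have hsplit : (∑ T ∈ n.primeFactors.powerset.erase ∅,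
        (if T ⊆ (n / e).primeFactors then (-1:ℤ) ^ (T.card + 1) else 0))
      = (∑ T ∈ n.primeFactors.powerset,
        (if T ⊆ (n / e).primeFactors then (-1:ℤ) ^ (T.card + 1) else 0))
        - (if (∅ : Finset ℕ) ⊆ (n / e).primeFactors then (-1:ℤ) ^ ((∅ : Finset ℕ).card + 1) else 0) :=
    eq_sub_of_add_eq (Finset.sum_erase_add _ _ (Finset.empty_mem_powerset _))
  rw [hsplit]
  have hfilter : n.primeFactors.powerset.filter (fun T => T ⊆ (n / e).primeFactors)
      = (n / e).primeFactors.powerset := by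
    ext T
    simp only [Finset.mem_filter, Finset.mem_powerset]
    exact ⟨fun h => h.2, fun h => ⟨h.trans hBsub, h⟩⟩
  rw [← Finset.sum_filter, hfilter]
  have hval : (∑ T ∈ (n / e).primeFactors.powerset, (-1:ℤ) ^ (T.card + 1))
      = -(if (n / e).primeFactors = ∅ then 1 else 0) := by
    have h1 : ∀ T : Finset ℕ, (-1:ℤ) ^ (T.card + 1) = (-1:ℤ) ^ T.card * (-1) := fun T => by
      rw [pow_succ]
    simp only [h1]
    rw [← Finset.sum_mul, Finset.sum_powerset_neg_one_pow_card]
    split_ifs <;> ring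
  rw [hval]
  have hBempty : ((n / e).primeFactors = ∅) ↔ e = n := by
    rw [Nat.primeFactors_eq_empty]
    constructor
    · rintro (h | h)
      · exact absurd h hne0
      · rw [h, mul_one] at hprod; omega
    · intro h
      right
      rw [h, Nat.div_self (by omega : 0 < n)]
  by_cases hen : e = n
  · rw [if_pos hen, if_pos (hBempty.mpr hen), if_pos (Finset.empty_subset _)]
    simp
  · rw [if_neg hen, if_neg (fun h => hen (hBempty.mp h)), if_pos (Finset.empty_subset _)]
    simp

lemma core {n : ℕ} (hn : 1 ≤ n) : sumDiv n = IE n := by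
  have hn0 : n ≠ 0 := by omega
  have step : ∀ T ∈ n.primeFactors.powerset.erase ∅,
      (-1:ℤ) ^ (T.card + 1) * (rawZ (n / T.prod id) * M (n / T.prod id) n)
      = ∑ e ∈ n.divisors,
          (if e ∣ n / T.prod id then (-1:ℤ) ^ (T.card + 1) else 0) * (prim e * M e n) := by
    intro T hT
    have hTsub : T ⊆ n.primeFactors := Finset.mem_powerset.mp (Finset.mem_of_mem_erase hT)
    have hTdvd : T.prod id ∣ n :=
      Finset.prod_primes_dvd n (fun p hp => (Nat.prime_of_mem_primeFactors (hTsub hp)).prime)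
        (fun p hp => Nat.dvd_of_mem_primeFactors (hTsub hp))
    have hcdvd : n / T.prod id ∣ n := ⟨T.prod id, (Nat.div_mul_cancel hTdvd).symm⟩
    have hc0 : n / T.prod id ≠ 0 := by
      have := Nat.div_mul_cancel hTdvd
      intro h; rw [h, zero_mul] at this; omega
    have h1 : rawZ (n / T.prod id) * M (n / T.prod id) n
        = ∑ e ∈ (n / T.prod id).divisors, prim e * M e n := by
      rw [raw_div_sum (Nat.one_le_iff_ne_zero.mpr hc0), Finset.sum_mul]
      refine Finset.sum_congr rfl (fun e heC => ?_)
      rw [mul_assoc, M_mul (Nat.pos_of_mem_divisors heC) (Nat.mem_divisors.mp heC).1 hcdvd]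
    rw [h1, ← Nat.divisors_filter_dvd_of_dvd hn0 hcdvd, Finset.sum_filter, Finset.mul_sum]
    refine Finset.sum_congr rfl (fun e _ => ?_)
    split_ifs <;> ring
  have hcalc : IE n = sumDiv n := by
    calc IE n = ∑ T ∈ n.primeFactors.powerset.erase ∅, ∑ e ∈ n.divisors,
            (if e ∣ n / T.prod id then (-1:ℤ) ^ (T.card + 1) else 0) * (prim e * M e n) :=
          Finset.sum_congr rfl step
      _ = ∑ e ∈ n.divisors, ∑ T ∈ n.primeFactors.powerset.erase ∅,
            (if e ∣ n / T.prod id then (-1:ℤ) ^ (T.card + 1) else 0) * (prim e * M e n) :=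
          Finset.sum_comm
      _ = ∑ e ∈ n.divisors, (if e = n then 0 else 1) * (prim e * M e n) := by
          refine Finset.sum_congr rfl (fun e he => ?_)
          rw [← Finset.sum_mul, signcount hn he]
      _ = sumDiv n := by
          unfold sumDiv
          rw [← Nat.insert_self_properDivisors hn0,
            Finset.sum_insert Nat.self_notMem_properDivisors, if_pos rfl, zero_mul, zero_add]
          refine Finset.sum_congr rfl (fun e he => ?_)
          rw [if_neg (ne_of_lt (Nat.mem_properDivisors.mp he).2), one_mul]
  exact hcalc.symm

-- list-to-Finset transfer for strictly increasing lists of positive integers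
lemma nodup_of_pairwise_lt {l : List ℤ} (h : l.Pairwise (· < ·)) : l.Nodup :=
  h.imp fun hab => ne_of_lt hab

lemma toFinset_map_toNat {l : List ℤ} {S : Finset ℕ} (hS : 0 ∉ S)
    (hmem : ∀ x : ℤ, x ∈ l ↔ 1 ≤ x ∧ x.toNat ∈ S) :
    (l.map Int.toNat).toFinset = S := by
  ext e
  simp only [List.mem_toFinset, List.mem_map]
  constructor
  · rintro ⟨x, hx, rfl⟩; exact ((hmem x).1 hx).2
  · intro he
    have h0 : e ≠ 0 := fun h => hS (h ▸ he)
    refine ⟨(e:ℤ), (hmem (e:ℤ)).2 ⟨by exact_mod_cast Nat.one_le_iff_ne_zero.mpr h0, by simpa⟩, by simp⟩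

lemma nodup_map_toNat {l : List ℤ} (h : l.Pairwise (· < ·)) (hpos : ∀ x ∈ l, (1:ℤ) ≤ x) :
    (l.map Int.toNat).Nodup := by
  refine (nodup_of_pairwise_lt h).map_on ?_
  intro x hx y hy hxy
  have := hpos x hx; have := hpos y hy; omega

lemma listsum_eq_finsetsum {l : List ℤ} {S : Finset ℕ} (hS : 0 ∉ S)
    (h : l.Pairwise (· < ·)) (hpos : ∀ x ∈ l, (1:ℤ) ≤ x)
    (hmem : ∀ x : ℤ, x ∈ l ↔ 1 ≤ x ∧ x.toNat ∈ S) (f : ℕ → ℤ) :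
    (l.map (fun e => f e.toNat)).sum = ∑ e ∈ S, f e := by
  have h1 : l.map (fun e => f e.toNat) = (l.map Int.toNat).map f := by
    simp [List.map_map, Function.comp]
  rw [h1, ← List.sum_toFinset f (nodup_map_toNat h hpos), toFinset_map_toNat hS hmem]

-- ===== A-side bridge =====

def dsL (L : Int) : List Int :=
  (PySem.List.pyRange 1 L 1).filter (fun d => PySem.Int.mod L d == 0)

lemma mem_dsL {L x : Int} : x ∈ dsL L ↔ (1 ≤ x ∧ x < L) ∧ x ∣ L := by
  simp [dsL, List.mem_filter, PySem.List.mem_pyRange_one, PySem.Int.mod_eq_zero_iff_dvd]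

lemma pairwise_dsL (L : Int) : (dsL L).Pairwise (· < ·) :=
  (PySem.List.pairwise_lt_pyRange_one 1 L).filter _

lemma foldl_sub_if {α : Type} (p : α → Bool) (f : α → ℤ) :
    ∀ (l : List α) (a0 : ℤ),
      l.foldl (fun a x => if p x then a - f x else a) a0 = a0 - ((l.filter p).map f).sum := by
  intro l
  induction l with
  | nil => intro a0; simp
  | cons x xs ih =>
    intro a0
    by_cases hp : p x <;> simp [hp, ih, sub_sub]

lemma int_dvd_iff_toNat {x y : ℤ} (hx : 0 ≤ x) (hy : 0 ≤ y) : x ∣ y ↔ x.toNat ∣ y.toNat := by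
  constructor
  · intro h
    have h2 : ((x.toNat : ℕ) : ℤ) ∣ ((y.toNat : ℕ) : ℤ) := by
      rw [show ((x.toNat : ℕ) : ℤ) = x by omega, show ((y.toNat : ℕ) : ℤ) = y by omega]
      exact h
    exact_mod_cast h2
  · intro h
    have h2 : ((x.toNat : ℕ) : ℤ) ∣ ((y.toNat : ℕ) : ℤ) := Int.natCast_dvd_natCast.mpr h
    rwa [show ((x.toNat : ℕ) : ℤ) = x by omega, show ((y.toNat : ℕ) : ℤ) = y by omega] at h2

lemma zero_not_mem_properDivisors {d : ℕ} : 0 ∉ d.properDivisors := by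
  intro h
  obtain ⟨hdvd, hlt⟩ := Nat.mem_properDivisors.mp h
  rw [zero_dvd_iff] at hdvd
  omega

lemma mem_left_of_lt {l1 l2 : List ℤ} {d x : ℤ}
    (h : (l1 ++ d :: l2).Pairwise (· < ·)) (hx : x ∈ l1 ++ d :: l2) (hlt : x < d) :
    x ∈ l1 := by
  rcases List.mem_append.mp hx with h1 | h2
  · exact h1
  · exfalso
    have hp : (d :: l2).Pairwise (· < ·) := h.sublist (List.sublist_append_right _ _)
    rcases List.mem_cons.mp h2 with rfl | h3
    · exact lt_irrefl x hlt
    · exact absurd hlt (not_lt.mpr (le_of_lt ((List.pairwise_cons.mp hp).1 x h3)))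

lemma foldA {n : ℕ} (hn : 2 ≤ n) :
    ∀ (todo done : List ℤ) (dict : PySem.Dict ℤ ℤ) (acc : ℤ),
      done ++ todo = dsL (n:ℤ) →
      dict.items = done.map (fun e => (e, prim e.toNat)) →
      acc = (done.map (fun e => prim e.toNat * M e.toNat n)).sum →
      (todo.foldl (stepA (n:ℤ)) (dict, acc)).2
        = ((dsL (n:ℤ)).map (fun e => prim e.toNat * M e.toNat n)).sum := by
  intro todo
  induction todo with
  | nil =>
    intro done dict acc hsplit hdict hacc
    rw [List.append_nil] at hsplit
    rw [List.foldl_nil, hacc, hsplit]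
  | cons d rest ih =>
    intro done dict acc hsplit hdict hacc
    have hpair' : (done ++ d :: rest).Pairwise (· < ·) := by
      rw [hsplit]; exact pairwise_dsL _
    have hd : d ∈ dsL (n:ℤ) := by
      rw [← hsplit]; exact List.mem_append.mpr (Or.inr (List.mem_cons_self))
    obtain ⟨⟨hd1, hdL⟩, hddvd⟩ := mem_dsL.mp hd
    have hdn : d.toNat ∣ n := by
      have := (int_dvd_iff_toNat (by omega) (by omega)).mp hddvd
      simpa using this
    have hdone_sub : done.Sublist (dsL (n:ℤ)) := by
      rw [← hsplit]; exact List.sublist_append_left done (d :: rest)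
    have hdone_pair : done.Pairwise (· < ·) := (pairwise_dsL _).sublist hdone_sub
    have hcross := (List.pairwise_append.mp hpair').2.2
    have hfiltmem : ∀ x : ℤ, x ∈ done.filter (fun e => PySem.Int.mod d e == 0)
        ↔ 1 ≤ x ∧ x.toNat ∈ d.toNat.properDivisors := by
      intro x
      rw [List.mem_filter]
      constructor
      · rintro ⟨hxdone, hpx⟩
        have hxds : x ∈ dsL (n:ℤ) := hdone_sub.subset hxdone
        obtain ⟨⟨hx1, hxL⟩, hxdvd⟩ := mem_dsL.mp hxds
        have hxd : x ∣ d := (PySem.Int.mod_eq_zero_iff_dvd d x).mp (by simpa using hpx)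
        have hxlt : x < d := hcross x hxdone d List.mem_cons_self
        refine ⟨hx1, Nat.mem_properDivisors.mpr ⟨?_, by omega⟩⟩
        have := (int_dvd_iff_toNat (by omega) (by omega)).mp hxd
        simpa using this
      · rintro ⟨hx1, hxpd⟩
        obtain ⟨hxdvd, hxlt⟩ := Nat.mem_properDivisors.mp hxpd
        have hxd : x ∣ d := by
          have := (int_dvd_iff_toNat (x := x) (y := d) (by omega) (by omega)).mpr hxdvd
          simpa using this
        have hxltd : x < d := by omega
        have hxds : x ∈ dsL (n:ℤ) := mem_dsL.mpr ⟨⟨hx1, by omega⟩, hxd.trans hddvd⟩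
        refine ⟨mem_left_of_lt hpair' (by rwa [hsplit]) hxltd, ?_⟩
        simp [PySem.Int.mod_eq_zero_iff_dvd, hxd]
    have hnotmem : d ∉ done := fun h => lt_irrefl d (hcross d h d List.mem_cons_self)
    have hprs : dict.items.foldl (fun acc kv =>
          if PySem.Int.mod d kv.1 == 0 then acc - kv.2 * repMult kv.1 d else acc)
          (sumArith ((10:ℤ) ^ (d - 1).toNat) ((10:ℤ) ^ d.toNat - 1)) = prim d.toNat := by
      rw [hdict, List.foldl_map]
      dsimp only
      rw [foldl_sub_if (fun e => PySem.Int.mod d e == 0) (fun e => prim e.toNat * repMult e d)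
        done _]
      have hraw : sumArith ((10:ℤ) ^ (d - 1).toNat) ((10:ℤ) ^ d.toNat - 1) = rawZ d.toNat := by
        unfold rawZ
        rw [show (d - 1).toNat = d.toNat - 1 by omega]
      have hmapc : (done.filter (fun e => PySem.Int.mod d e == 0)).map
            (fun e => prim e.toNat * repMult e d)
          = (done.filter (fun e => PySem.Int.mod d e == 0)).map
            (fun e => (fun k => prim k * M k d.toNat) e.toNat) := by
        refine List.map_congr_left (fun e he => ?_)
        obtain ⟨he1, hepd⟩ := (hfiltmem e).mp he
        obtain ⟨hedvd, helt⟩ := Nat.mem_properDivisors.mp hepd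
        have hrm : repMult e d = M e.toNat d.toNat := by
          have := repMult_eq (e := e.toNat) (d := d.toNat) (by omega) hedvd
          rwa [show ((e.toNat : ℕ) : ℤ) = e by omega, show ((d.toNat : ℕ) : ℤ) = d by omega]
            at this
        rw [hrm]
      rw [hraw, hmapc,
        listsum_eq_finsetsum zero_not_mem_properDivisors (hdone_pair.filter _)
          (fun x hx => ((hfiltmem x).mp hx).1) hfiltmem (fun k => prim k * M k d.toNat),
        prim_def d.toNat]
    have hcont : dict.contains d = false := by
      rw [PySem.Dict.contains_eq_decide_mem_keys]
      simp only [PySem.Dict.keys, hdict, List.map_map]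
      simp [Function.comp, hnotmem]
    have hrmd : repMult d (n:ℤ) = M d.toNat n := by
      have := repMult_eq (e := d.toNat) (d := n) (by omega) hdn
      rwa [show ((d.toNat : ℕ) : ℤ) = d by omega] at this
    have hstep : stepA (n:ℤ) (dict, acc) d
        = (dict.insert d (prim d.toNat), acc + prim d.toNat * M d.toNat n) := by
      unfold stepA
      simp only [hprs, hrmd]
    rw [List.foldl_cons, hstep]
    refine ih (done ++ [d]) _ _ ?_ ?_ ?_
    · rw [List.append_assoc]; simpa using hsplit
    · rw [PySem.Dict.items_insert_of_not_contains (h := hcont), hdict, List.map_append]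
      rfl
    · rw [List.map_append, List.sum_append, hacc]
      simp

lemma dsL_mem_iff {n : ℕ} (hn : 2 ≤ n) :
    ∀ x : ℤ, x ∈ dsL (n:ℤ) ↔ 1 ≤ x ∧ x.toNat ∈ n.properDivisors := by
  intro x
  rw [mem_dsL]
  constructor
  · rintro ⟨⟨hx1, hxn⟩, hxdvd⟩
    refine ⟨hx1, Nat.mem_properDivisors.mpr ⟨?_, by omega⟩⟩
    have := (int_dvd_iff_toNat (by omega) (by omega : (0:ℤ) ≤ (n:ℤ))).mp hxdvd
    simpa using this
  · rintro ⟨hx1, hxpd⟩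
    obtain ⟨hxdvd, hxlt⟩ := Nat.mem_properDivisors.mp hxpd
    refine ⟨⟨hx1, by omega⟩, ?_⟩
    have := (int_dvd_iff_toNat (x := x) (y := (n:ℤ)) (by omega) (by omega)).mpr
      (by simpa using hxdvd)
    exact this

lemma A_bridge {n : ℕ} (hn : 2 ≤ n) :
    sum_invalid_for_fixed_length (n:ℤ) = sumDiv n := by
  unfold sum_invalid_for_fixed_length
  have hsorted : PySem.List.sorted (dsL (n:ℤ)) (fun x => x) false = dsL (n:ℤ) :=
    PySem.List.sorted_eq_self_of_pairwise (dsL (n:ℤ)) (fun x => x)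
      ((pairwise_dsL (n:ℤ)).imp fun h => le_of_lt h)
  show ((PySem.List.sorted (dsL (n:ℤ)) (fun x => x) false).foldl (stepA (n:ℤ))
    (PySem.Dict.empty, 0)).2 = sumDiv n
  rw [hsorted, foldA hn (dsL (n:ℤ)) [] PySem.Dict.empty 0 rfl rfl rfl]
  unfold sumDiv
  exact listsum_eq_finsetsum zero_not_mem_properDivisors (pairwise_dsL _)
    (fun x hx => ((dsL_mem_iff hn x).mp hx).1) (dsL_mem_iff hn) (fun k => prim k * M k n)

-- ===== B-side bridge =====

def psL (L : Int) : List Int :=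
  (PySem.List.pyRange 2 (L + 1) 1).filter (fun p =>
      PySem.Int.mod L p == 0 &&
        (PySem.List.pyRange 2 p 1).all (fun q => PySem.Int.mod p q != 0))

lemma mem_psL {n : ℕ} (hn : 2 ≤ n) {p : Int} :
    p ∈ psL (n:ℤ) ↔ 1 ≤ p ∧ p.toNat ∈ n.primeFactors := by
  have hn0 : n ≠ 0 := by omega
  simp only [psL, List.mem_filter, PySem.List.mem_pyRange_one, Bool.and_eq_true, beq_iff_eq,
    PySem.Int.mod_eq_zero_iff_dvd, List.all_eq_true, bne_iff_ne, ne_eq]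
  constructor
  · rintro ⟨⟨h2, hlt⟩, hdvd, hall⟩
    refine ⟨by omega, Nat.mem_primeFactors.mpr ⟨?_, ?_, hn0⟩⟩
    · rw [Nat.prime_def_lt]
      refine ⟨by omega, fun m hm hmdvd => ?_⟩
      by_contra hm1
      have hm0 : m ≠ 0 := by
        rintro rfl; rw [zero_dvd_iff] at hmdvd; omega
      have hmp : ((m:ℤ)) ∣ p := by
        have : ((m:ℤ)) ∣ ((p.toNat : ℕ) : ℤ) := Int.natCast_dvd_natCast.mpr hmdvd
        rwa [show ((p.toNat : ℕ) : ℤ) = p by omega] at this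
      exact hall (m:ℤ) ⟨by omega, by omega⟩ hmp
    · have : ((p.toNat : ℕ) : ℤ) ∣ ((n : ℕ) : ℤ) := by
        rwa [show ((p.toNat : ℕ) : ℤ) = p by omega]
      exact_mod_cast this
  · rintro ⟨hp1, hpf⟩
    obtain ⟨hprime, hdvdn, -⟩ := Nat.mem_primeFactors.mp hpf
    have hp2 : 2 ≤ p.toNat := hprime.two_le
    have hple : p.toNat ≤ n := Nat.le_of_dvd (by omega) hdvdn
    refine ⟨⟨by omega, by omega⟩, ?_, ?_⟩
    · have : ((p.toNat : ℕ) : ℤ) ∣ ((n : ℕ) : ℤ) := Int.natCast_dvd_natCast.mpr hdvdn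
      rwa [show ((p.toNat : ℕ) : ℤ) = p by omega] at this
    · intro q hq hqdvd
      obtain ⟨hq2, hqp⟩ := hq
      have hqn : q.toNat ∣ p.toNat := by
        have : ((q.toNat : ℕ) : ℤ) ∣ ((p.toNat : ℕ) : ℤ) := by
          rw [show ((q.toNat : ℕ) : ℤ) = q by omega, show ((p.toNat : ℕ) : ℤ) = p by omega]
          exact hqdvd
        exact_mod_cast this
      have := (Nat.prime_def_lt.mp hprime).2 q.toNat (by omega) hqn
      omega

lemma pairwise_psL (L : Int) : (psL L).Pairwise (· < ·) :=
  (PySem.List.pairwise_lt_pyRange_one 2 (L+1)).filter _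

def accF : List (ℤ × ℤ) → ℤ → List (ℤ × ℤ) :=
  fun acc p => acc ++ acc.map (fun ms => (ms.1 * p, -ms.2))

lemma subsets_head : ∀ (qs : List ℤ) (x : ℤ × ℤ) (xs : List (ℤ × ℤ)),
    ∃ ys, qs.foldl accF (x :: xs) = x :: ys := by
  intro qs
  induction qs with
  | nil => intro x xs; exact ⟨xs, rfl⟩
  | cons p ps ih =>
    intro x xs
    have h : accF (x :: xs) p = x :: (xs ++ (x :: xs).map (fun ms => (ms.1 * p, -ms.2))) := rfl
    rw [List.foldl_cons, h]
    exact ih x _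

lemma subsets_sum (F : ℤ × ℤ → ℤ) :
    ∀ (qs : List ℤ), qs.Nodup → ∀ (init : List (ℤ × ℤ)),
      ((qs.foldl accF init).map F).sum
        = ∑ T ∈ qs.toFinset.powerset,
            (init.map (fun ms => F (ms.1 * T.prod id, ms.2 * (-1:ℤ) ^ T.card))).sum := by
  intro qs
  induction qs with
  | nil =>
    intro _ init
    simp
  | cons p ps ih =>
    intro hnd init
    have hpmem : p ∉ ps := (List.nodup_cons.mp hnd).1
    rw [List.foldl_cons, ih (List.nodup_cons.mp hnd).2 (accF init p),
      List.toFinset_cons, Finset.sum_powerset_insert (by simpa using hpmem)]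
    have hexp : ∀ T ∈ ps.toFinset.powerset,
        ((accF init p).map (fun ms => F (ms.1 * T.prod id, ms.2 * (-1:ℤ) ^ T.card))).sum
        = (init.map (fun ms => F (ms.1 * T.prod id, ms.2 * (-1:ℤ) ^ T.card))).sum
          + (init.map (fun ms => F (ms.1 * (insert p T).prod id,
              ms.2 * (-1:ℤ) ^ (insert p T).card))).sum := by
      intro T hT
      have hpT : p ∉ T := fun h => hpmem (List.mem_toFinset.mp (Finset.mem_powerset.mp hT h))
      rw [Finset.prod_insert hpT, Finset.card_insert_of_notMem hpT]
      simp only [accF, List.map_append, List.sum_append, List.map_map]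
      congr 1
      refine congrArg List.sum (List.map_congr_left (fun ms _ => ?_))
      simp only [Function.comp]
      refine congrArg F (Prod.ext ?_ ?_)
      · simp only [id_eq]; ring
      · simp only [pow_succ]; ring
    rw [Finset.sum_congr rfl hexp, Finset.sum_add_distrib]

lemma powerset_reindex {l : List ℤ} {S : Finset ℕ} (hS : 0 ∉ S)
    (hmem : ∀ x : ℤ, x ∈ l ↔ 1 ≤ x ∧ x.toNat ∈ S) (f : ℤ → ℕ → ℤ) :
    ∑ T ∈ l.toFinset.powerset, f (T.prod id) T.card
      = ∑ T ∈ S.powerset, f ((T.prod id : ℕ) : ℤ) T.card := by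
  have hpos : ∀ x ∈ l.toFinset, (1:ℤ) ≤ x :=
    fun x hx => ((hmem x).1 (List.mem_toFinset.mp hx)).1
  refine Finset.sum_bij' (i := fun T _ => T.image Int.toNat)
    (j := fun T _ => T.image (Nat.cast : ℕ → ℤ)) ?_ ?_ ?_ ?_ ?_
  · intro T hT
    rw [Finset.mem_powerset] at hT ⊢
    intro x hx
    obtain ⟨y, hy, rfl⟩ := Finset.mem_image.mp hx
    exact ((hmem y).1 (List.mem_toFinset.mp (hT hy))).2
  · intro T hT
    rw [Finset.mem_powerset] at hT ⊢
    intro x hx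
    obtain ⟨y, hy, rfl⟩ := Finset.mem_image.mp hx
    have hy0 : y ≠ 0 := fun h => hS (h ▸ hT hy)
    refine List.mem_toFinset.mpr ((hmem (y:ℤ)).2 ⟨by exact_mod_cast Nat.one_le_iff_ne_zero.mpr hy0, by simpa using hT hy⟩)
  · intro T hT
    dsimp only
    rw [Finset.image_image]
    refine (Finset.image_congr ?_).trans Finset.image_id
    intro x hx
    have := hpos x (Finset.mem_powerset.mp hT hx)
    simp only [Function.comp_apply, id_eq]
    omega
  · intro T hT
    dsimp only
    rw [Finset.image_image]
    refine (Finset.image_congr ?_).trans Finset.image_id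
    intro x hx
    have : x ≠ 0 := fun h => hS (h ▸ Finset.mem_powerset.mp hT hx)
    simp only [Function.comp_apply, id_eq]
    omega
  · intro T hT
    dsimp only
    have hinj : Set.InjOn Int.toNat T := by
      intro x hx y hy hxy
      have := hpos x (Finset.mem_powerset.mp hT hx)
      have := hpos y (Finset.mem_powerset.mp hT hy)
      omega
    rw [Finset.prod_image hinj, Finset.card_image_of_injOn hinj]
    congr 1
    rw [Nat.cast_prod]
    refine (Finset.prod_congr rfl ?_).symm
    intro x hx
    have := hpos x (Finset.mem_powerset.mp hT hx)
    simp only [id_eq]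
    omega

lemma raw_lo_le_hi {c : ℕ} (hc : 1 ≤ c) : (10:ℤ) ^ (c - 1) ≤ (10:ℤ) ^ c - 1 := by
  have h1 : (10:ℤ) ^ c = 10 ^ (c - 1) * 10 := by
    rw [← pow_succ]
    congr 1
    omega
  have h2 : (1:ℤ) ≤ 10 ^ (c - 1) := one_le_pow₀ (by norm_num)
  nlinarith

lemma rawZ_eq {c : ℕ} (hc : 1 ≤ c) :
    PySem.Int.floordiv ((((10:ℤ) ^ c - 1) - 10 ^ (c - 1) + 1) * (10 ^ (c - 1) + ((10:ℤ) ^ c - 1))) 2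
      = rawZ c := by
  unfold rawZ sumArith
  rw [if_neg (not_lt.mpr (raw_lo_le_hi hc))]

lemma B_bridge {n : ℕ} (hn : 2 ≤ n) :
    sum_invalid_for_fixed_length_alt (n:ℤ) = IE n := by
  have hn0 : n ≠ 0 := by omega
  unfold sum_invalid_for_fixed_length_alt
  rw [if_neg (by omega : ¬ ((n:ℤ) < 2))]
  show ((((psL (n:ℤ)).foldl accF [((1:ℤ), (1:ℤ))]).drop 1).foldl
    (fun t ms =>
      t + (-ms.2) * PySem.Int.floordiv
            ((((10:ℤ) ^ (PySem.Int.floordiv (n:ℤ) ms.1).toNat - 1)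
                - 10 ^ ((PySem.Int.floordiv (n:ℤ) ms.1) - 1).toNat + 1)
              * (10 ^ ((PySem.Int.floordiv (n:ℤ) ms.1) - 1).toNat
                + ((10:ℤ) ^ (PySem.Int.floordiv (n:ℤ) ms.1).toNat - 1))) 2
          * PySem.Int.floordiv ((10:ℤ) ^ ((n:ℤ)).toNat - 1)
              ((10:ℤ) ^ (PySem.Int.floordiv (n:ℤ) ms.1).toNat - 1)) 0) = IE n
  set G : ℤ × ℤ → ℤ := fun ms =>
    (-ms.2) * PySem.Int.floordiv
          ((((10:ℤ) ^ (PySem.Int.floordiv (n:ℤ) ms.1).toNat - 1)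
              - 10 ^ ((PySem.Int.floordiv (n:ℤ) ms.1) - 1).toNat + 1)
            * (10 ^ ((PySem.Int.floordiv (n:ℤ) ms.1) - 1).toNat
              + ((10:ℤ) ^ (PySem.Int.floordiv (n:ℤ) ms.1).toNat - 1))) 2
        * PySem.Int.floordiv ((10:ℤ) ^ ((n:ℤ)).toNat - 1)
            ((10:ℤ) ^ (PySem.Int.floordiv (n:ℤ) ms.1).toNat - 1) with hG
  obtain ⟨ys, hys⟩ := subsets_head (psL (n:ℤ)) (1, 1) []
  have hnodup : (psL (n:ℤ)).Nodup := nodup_of_pairwise_lt (pairwise_psL _)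
  have h3 := subsets_sum G (psL (n:ℤ)) hnodup [((1:ℤ), (1:ℤ))]
  rw [hys] at h3
  have h4 := powerset_reindex (l := psL (n:ℤ)) (S := n.primeFactors)
    (fun h => Nat.not_prime_zero (Nat.prime_of_mem_primeFactors h))
    (fun x => mem_psL hn) (fun m c => G (m, (-1:ℤ) ^ c))
  have hys_sum : ys.foldl (fun t ms => t + G ms) 0 = (ys.map G).sum := by
    rw [PySem.List.foldl_add ys G 0, zero_add]
  have hcons : ((((1:ℤ), (1:ℤ)) :: ys).map G).sum = G (1, 1) + (ys.map G).sum := by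
    simp
  have hsingle : ∀ T : Finset ℤ,
      ([((1:ℤ), (1:ℤ))].map (fun ms => G (ms.1 * T.prod id, ms.2 * (-1:ℤ) ^ T.card))).sum
        = G (T.prod id, (-1:ℤ) ^ T.card) := by
    intro T
    simp
  have h5 : ∑ T ∈ n.primeFactors.powerset, G (((T.prod id : ℕ) : ℤ), (-1:ℤ) ^ T.card)
      = (∑ T ∈ n.primeFactors.powerset.erase ∅,
          G (((T.prod id : ℕ) : ℤ), (-1:ℤ) ^ T.card)) + G (1, 1) := by
    have h := (Finset.sum_erase_add n.primeFactors.powerset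
      (fun T => G (((T.prod id : ℕ) : ℤ), (-1:ℤ) ^ T.card))
      (Finset.empty_mem_powerset n.primeFactors)).symm
    simpa using h
  rw [hys, List.drop_one, List.tail_cons, hys_sum]
  have hmaps : (ys.map G).sum
      = (∑ T ∈ n.primeFactors.powerset.erase ∅,
          G (((T.prod id : ℕ) : ℤ), (-1:ℤ) ^ T.card)) := by
    have h6 := h3
    rw [hcons, Finset.sum_congr rfl (fun T _ => hsingle T), h4, h5] at h6
    linarith
  rw [hmaps]
  refine Finset.sum_congr rfl (fun T hT => ?_)
  have hTsub : T ⊆ n.primeFactors := Finset.mem_powerset.mp (Finset.mem_of_mem_erase hT)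
  have hTdvd : T.prod id ∣ n :=
    Finset.prod_primes_dvd n (fun p hp => (Nat.prime_of_mem_primeFactors (hTsub hp)).prime)
      (fun p hp => Nat.dvd_of_mem_primeFactors (hTsub hp))
  have hm0 : T.prod id ≠ 0 := by
    intro h
    rw [h, zero_dvd_iff] at hTdvd
    omega
  have hc1 : 1 ≤ n / T.prod id := Nat.div_pos (Nat.le_of_dvd (by omega) hTdvd) (by omega)
  have hcdvd : n / T.prod id ∣ n := ⟨T.prod id, (Nat.div_mul_cancel hTdvd).symm⟩
  have hfd : PySem.Int.floordiv (n:ℤ) ((T.prod id : ℕ) : ℤ) = ((n / T.prod id : ℕ) : ℤ) :=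
    PySem.Int.floordiv_natCast n (T.prod id)
  simp only [hG, hfd]
  rw [show (((n / T.prod id : ℕ) : ℤ) - 1).toNat = n / T.prod id - 1 by omega,
    show (((n / T.prod id : ℕ) : ℤ)).toNat = n / T.prod id by omega,
    show (((n : ℕ) : ℤ)).toNat = n by omega,
    rawZ_eq hc1, floordiv_pow hc1 hcdvd, pow_succ]
  ring

-- ===== VERDICT (by name: the statement is the Claim_ definition above) =====
theorem sum_invalid_for_fixed_length_spec : Claim_equal_sum_invalid_for_fixed_length := by
  intro L _
  unfold Spec_sum_invalid_for_fixed_length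
  by_cases hL : L < 2
  · have hA : sum_invalid_for_fixed_length L = 0 := by
      unfold sum_invalid_for_fixed_length
      rw [PySem.List.pyRange_one_eq_nil (by omega)]
      rfl
    have hB : sum_invalid_for_fixed_length_alt L = 0 := by
      unfold sum_invalid_for_fixed_length_alt
      simp [hL]
    rw [hA, hB]
  · rw [not_lt] at hL
    set n := L.toNat with hn
    have hLn : L = (n:ℤ) := by omega
    have h2 : 2 ≤ n := by omega
    rw [hLn, A_bridge h2, B_bridge h2, core (by omega)]
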